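-- pv_equiv track=rewrite | github.com/OneSeven17/HW4lessonBestTotal | app/BestTotal.py | best_total
-- ===== SOURCE A (Python) =====
-- def best_total(shops_list):
--     sales_sum = []
--     for shop in shops_list:
--         sales_sum.append(sum(shop))
--
--     max_sale = max(sales_sum)
--     sales_sum_index = []
--     index = 0
--     for sale in sales_sum:
--         if sale == max_sale:
--             sales_sum_index.append(index)
--             sales_sum_index.append(sale)
--
--         index += 1
--
--
--     return sales_sum_index
-- ===== SOURCE B (Python) =====
-- def best_total(shops_list):
--     result = []
--     best = None
--     for i, shop in enumerate(shops_list):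
--         s = sum(shop)
--         if best is None or s > best:
--             best = s
--             result = [i, s]
--         elif s == best:
--             result.extend([i, s])
--     return result
-- ===== Notes on version B (the rewrite author's own statement) =====
-- stated objective: alternative
-- what changed: Replaced A's three-pass structure (build all sums, take max, filter with a manual index counter) by a single enumerate pass that keeps a running best total, resetting the result list on a new maximum and extending it on a tie.
import Mathlib
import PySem

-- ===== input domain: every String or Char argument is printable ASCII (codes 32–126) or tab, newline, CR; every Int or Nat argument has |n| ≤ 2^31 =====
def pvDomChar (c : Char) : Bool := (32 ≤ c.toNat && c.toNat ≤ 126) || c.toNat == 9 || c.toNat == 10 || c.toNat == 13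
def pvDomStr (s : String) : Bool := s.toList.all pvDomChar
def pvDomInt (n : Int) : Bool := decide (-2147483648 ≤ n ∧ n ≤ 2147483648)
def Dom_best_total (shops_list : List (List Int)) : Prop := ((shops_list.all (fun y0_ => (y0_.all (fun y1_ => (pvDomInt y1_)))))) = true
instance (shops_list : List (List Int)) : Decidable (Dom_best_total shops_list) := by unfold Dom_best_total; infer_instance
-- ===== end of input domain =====

-- B replaces A's three passes (all sums, max, filter-by-index) with one running-maximum pass; objective: alternative (same cost).

-- ===== PORT A =====
-- loop body of A's first loop: sales_sum.append(sum(shop))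
def pvSumStep (acc : List Int) (shop : List Int) : List Int :=
  acc ++ [shop.foldl (· + ·) 0]

-- loop body of A's second loop, state = (sales_sum_index, index)
def pvFilterStep (max_sale : Int) (st : List Int × Int) (sale : Int) : List Int × Int :=
  (if sale = max_sale then st.1 ++ [st.2, sale] else st.1, st.2 + 1)

def best_total (shops_list : List (List Int)) : List Int :=
  let sales_sum := shops_list.foldl pvSumStep []
  match PySem.List.max? sales_sum (fun y => y) with
  | none => []  -- Python: max([]) raises ValueError; excluded by Pre_best_total
  | some max_sale => (sales_sum.foldl (pvFilterStep max_sale) ([], 0)).1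

-- ===== PORT B =====
-- loop body of B's single pass, state = (result, best : Option Int), element = (i, shop)
def pvBestStep (st : List Int × Option Int) (p : Int × List Int) : List Int × Option Int :=
  let s := p.2.foldl (· + ·) 0
  match st.2 with
  | none => ([p.1, s], some s)
  | some b =>
      if s > b then ([p.1, s], some s)
      else if s = b then (st.1 ++ [p.1, s], some b)
      else st

def best_total_alt (shops_list : List (List Int)) : List Int :=
  ((PySem.List.enumerate shops_list).foldl pvBestStep ([], none)).1

-- ===== PRECONDITION & SPEC =====
-- A raises ValueError on the empty list (max of an empty sequence); excluded.
def Pre_best_total (shops_list : List (List Int)) : Prop := shops_list ≠ []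
instance (shops_list : List (List Int)) : Decidable (Pre_best_total shops_list) := by unfold Pre_best_total; infer_instance

def pvWitness_best_total : List (List Int) := [[1, 2], [3]]

def Spec_best_total (shops_list : List (List Int)) (out : List Int) : Prop := out = best_total_alt shops_list
instance (shops_list : List (List Int)) (out : List Int) : Decidable (Spec_best_total shops_list out) := by unfold Spec_best_total; infer_instance

-- ===== CLAIM (what is proved, stated in full; the proofs are below) =====
def Claim_equal_best_total : Prop := ∀ (shops_list : List (List Int)), Dom_best_total shops_list → Pre_best_total shops_list → Spec_best_total shops_list (best_total shops_list)

-- ===== LEMMAS AND PROOFS =====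

-- the pairs [i, s] contributed by the entries of xs (starting at index i) whose value equals M
def pvCollect (xs : List Int) (M : Int) (i : Int) : List Int :=
  match xs with
  | [] => []
  | s :: t => (if s = M then [i, s] else []) ++ pvCollect t M (i + 1)

theorem pvSumStep_foldl (xs : List (List Int)) (acc : List Int) :
    xs.foldl pvSumStep acc = acc ++ xs.map (fun shop => shop.foldl (· + ·) 0) := by
  induction xs generalizing acc with
  | nil => simp
  | cons x t ih => simp [pvSumStep, ih]

theorem pvFilterStep_foldl (xs : List Int) (M : Int) (acc : List Int) (i : Int) :
    xs.foldl (pvFilterStep M) (acc, i) = (acc ++ pvCollect xs M i, (i + xs.length : Int)) := by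
  induction xs generalizing acc i with
  | nil => simp [pvCollect]
  | cons s t ih =>
      simp only [List.foldl_cons, pvFilterStep, ih, pvCollect]
      split_ifs with h <;> simp <;> omega

theorem pvBestStep_foldl (xs : List (List Int)) :
    ∀ (b : Int) (res : List Int) (i0 : Int),
    (PySem.List.enumerate xs i0).foldl pvBestStep (res, some b)
      = ((if List.foldl max b (xs.map (fun shop => shop.foldl (· + ·) 0)) = b
          then res ++ pvCollect (xs.map (fun shop => shop.foldl (· + ·) 0)) b i0
          else pvCollect (xs.map (fun shop => shop.foldl (· + ·) 0))
                 (List.foldl max b (xs.map (fun shop => shop.foldl (· + ·) 0))) i0),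
         some (List.foldl max b (xs.map (fun shop => shop.foldl (· + ·) 0)))) := by
  induction xs with
  | nil => intro b res i0; simp [PySem.List.enumerate, pvCollect]
  | cons shop t ih =>
      intro b res i0
      rw [PySem.List.enumerate_cons, List.foldl_cons]
      set s := shop.foldl (· + ·) 0 with hs
      by_cases hgt : s > b
      · have hstep : pvBestStep (res, some b) ((i0 : Int), shop) = ([i0, s], some s) := by
          simp [pvBestStep, ← hs, hgt]
        rw [hstep, ih s [i0, s] (i0 + 1)]
        have hmax : max b s = s := by omega
        have hle : s ≤ List.foldl max s (t.map (fun shop => shop.foldl (· + ·) 0)) :=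
          (PySem.List.le_foldl_max _ s).1
        simp only [List.map_cons, List.foldl_cons, ← hs, hmax, pvCollect]
        by_cases he : List.foldl max s (t.map (fun shop => shop.foldl (· + ·) 0)) = s
        · simp [he, ne_of_gt hgt]
        · have hne : List.foldl max s (t.map (fun shop => shop.foldl (· + ·) 0)) ≠ b := by omega
          have hne2 : s ≠ List.foldl max s (t.map (fun shop => shop.foldl (· + ·) 0)) :=
            fun h => he h.symm
          simp [he, hne, hne2]
      · by_cases heq : s = b
        · have hstep : pvBestStep (res, some b) ((i0 : Int), shop) = (res ++ [i0, s], some b) := by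
            simp [pvBestStep, ← hs, hgt, heq]
          rw [hstep, ih b (res ++ [i0, s]) (i0 + 1)]
          have hmax : max b s = b := by omega
          simp only [List.map_cons, List.foldl_cons, ← hs, hmax, pvCollect]
          by_cases he : List.foldl max b (t.map (fun shop => shop.foldl (· + ·) 0)) = b
          · simp [he, heq]
          · have hne2 : s ≠ List.foldl max b (t.map (fun shop => shop.foldl (· + ·) 0)) := by
              intro h; exact he (by omega)
            simp [he, hne2]
        · have hstep : pvBestStep (res, some b) ((i0 : Int), shop) = (res, some b) := by
            simp [pvBestStep, ← hs, hgt, heq]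
          rw [hstep, ih b res (i0 + 1)]
          have hmax : max b s = b := by omega
          have hle : b ≤ List.foldl max b (t.map (fun shop => shop.foldl (· + ·) 0)) :=
            (PySem.List.le_foldl_max _ b).1
          simp only [List.map_cons, List.foldl_cons, ← hs, hmax, pvCollect]
          by_cases he : List.foldl max b (t.map (fun shop => shop.foldl (· + ·) 0)) = b
          · simp [he, heq]
          · have hne2 : s ≠ List.foldl max b (t.map (fun shop => shop.foldl (· + ·) 0)) := by
              intro h; omega
            simp [he, hne2]

-- ===== VERDICT (by name: the statement is the Claim_ definition above) =====
theorem best_total_spec : Claim_equal_best_total := by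
  intro shops_list _ hpre
  unfold Spec_best_total
  cases shops_list with
  | nil => exact absurd rfl hpre
  | cons shop t =>
      unfold best_total best_total_alt
      rw [pvSumStep_foldl]
      simp only [List.map_cons, List.nil_append, PySem.List.max?_id_cons]
      rw [pvFilterStep_foldl, PySem.List.enumerate_cons, List.foldl_cons]
      have hstep : pvBestStep ([], none) ((0 : Int), shop)
          = ([0, shop.foldl (· + ·) 0], some (shop.foldl (· + ·) 0)) := by
        simp [pvBestStep]
      rw [hstep, show ((0 : Int) + 1) = 1 from by norm_num,
        pvBestStep_foldl t (shop.foldl (· + ·) 0) [0, shop.foldl (· + ·) 0] 1]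
      set s := shop.foldl (· + ·) 0 with hs
      set m := List.foldl max s (t.map (fun shop => shop.foldl (· + ·) 0)) with hm
      simp only [pvCollect, List.nil_append]
      by_cases he : m = s
      · simp [he]
      · have hne2 : s ≠ m := fun h => he h.symm
        simp [he, hne2]
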